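-- pv_equiv track=rewrite | github.com/satwikbh/MachineLearning | ThirdPartyProjects/evaluate_clustering.py | tp_fp_fn
-- ===== SOURCE A (Python) =====
-- def tp_fp_fn(correct_set, guess_set):
--     """
--     INPUT: dictionary with the elements in the cluster from the ground truth
--     (CORRECT_SET) and dictionary with the elements from the estimated cluster
--     (ESTIMATED_SET).
--
--     OUTPUT: number of True Positives (elements in both clusters), False
--     Positives (elements only in the ESTIMATED_SET), False Negatives (elements
--     only in the CORRECT_SET).
--     """
--     tp = 0
--     fp = 0
--     fn = 0
--     for elem in guess_set:
--         # True Positives (elements in both clusters)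
--         if elem in correct_set:
--             tp += 1
--         else:
--             # False Positives (elements only in the "estimated cluster")
--             fp += 1
--     for elem in correct_set:
--         if elem not in guess_set:
--             # False Negatives (elements only in the "correct cluster")
--             fn += 1
--     return tp, fp, fn
-- ===== SOURCE B (Python) =====
-- def tp_fp_fn(correct_set, guess_set):
--     # One pass per input builds a frequency table; fp/fn are sums over the
--     # distinct keys, tp is the arithmetic complement.
--     guess_counts = {}
--     for elem in guess_set:
--         guess_counts[elem] = guess_counts.get(elem, 0) + 1
--     correct_counts = {}
--     for elem in correct_set:
--         correct_counts[elem] = correct_counts.get(elem, 0) + 1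
--     fp = sum(c for e, c in guess_counts.items() if e not in correct_counts)
--     fn = sum(c for e, c in correct_counts.items() if e not in guess_counts)
--     tp = len(guess_set) - fp
--     return tp, fp, fn
-- ===== Notes on version B (the rewrite author's own statement) =====
-- stated objective: alternative
-- what changed: Replaced the two membership-scanning counting loops by frequency dictionaries built in one pass each, summing counts over the distinct keys and obtaining tp as len(guess_set) minus fp.
import Mathlib
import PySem

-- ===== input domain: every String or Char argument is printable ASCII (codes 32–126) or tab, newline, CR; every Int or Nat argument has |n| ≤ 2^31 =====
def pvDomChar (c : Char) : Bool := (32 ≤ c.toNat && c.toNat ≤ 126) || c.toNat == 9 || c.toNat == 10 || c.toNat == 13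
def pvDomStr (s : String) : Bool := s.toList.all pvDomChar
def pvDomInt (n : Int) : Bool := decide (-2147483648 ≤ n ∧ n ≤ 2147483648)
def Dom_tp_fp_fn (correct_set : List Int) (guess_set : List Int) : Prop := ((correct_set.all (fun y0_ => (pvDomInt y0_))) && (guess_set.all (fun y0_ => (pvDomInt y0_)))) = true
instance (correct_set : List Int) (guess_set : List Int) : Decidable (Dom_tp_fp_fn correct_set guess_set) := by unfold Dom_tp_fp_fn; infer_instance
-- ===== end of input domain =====

-- B replaces A's two membership-scanning counting loops with one-pass frequency
-- dictionaries and sums over their distinct keys (tp = len(guess) - fp): alternative algorithm.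

-- ===== PORT A =====
def tp_fp_fn (correct_set : List Int) (guess_set : List Int) : Int × Int × Int :=
  -- first loop: tp/fp accumulated together over guess_set
  let tpfp : Int × Int :=
    guess_set.foldl (fun p elem =>
      if elem ∈ correct_set then (p.1 + 1, p.2) else (p.1, p.2 + 1)) (0, 0)
  -- second loop: fn over correct_set
  let fn : Int :=
    correct_set.foldl (fun f elem => if elem ∈ guess_set then f else f + 1) 0
  (tpfp.1, tpfp.2, fn)

-- ===== PORT B =====
def tp_fp_fn_alt (correct_set : List Int) (guess_set : List Int) : Int × Int × Int :=
  -- guess_counts[e] = guess_counts.get(e, 0) + 1, one pass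
  let guess_counts : PySem.Dict Int Int :=
    guess_set.foldl (fun d elem => d.insert elem (d.getD elem 0 + 1)) PySem.Dict.empty
  let correct_counts : PySem.Dict Int Int :=
    correct_set.foldl (fun d elem => d.insert elem (d.getD elem 0 + 1)) PySem.Dict.empty
  let fp : Int :=
    guess_counts.items.foldl (fun s p => if correct_counts.contains p.1 then s else s + p.2) 0
  let fn : Int :=
    correct_counts.items.foldl (fun s p => if guess_counts.contains p.1 then s else s + p.2) 0
  let tp : Int := (guess_set.length : Int) - fp
  (tp, fp, fn)

-- ===== PRECONDITION & SPEC =====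
def Spec_tp_fp_fn (correct_set : List Int) (guess_set : List Int) (out : Int × Int × Int) : Prop := out = tp_fp_fn_alt correct_set guess_set
instance (correct_set : List Int) (guess_set : List Int) (out : Int × Int × Int) : Decidable (Spec_tp_fp_fn correct_set guess_set out) := by unfold Spec_tp_fp_fn; infer_instance

-- ===== CLAIM (what is proved, stated in full; the proofs are below) =====
def Claim_equal_tp_fp_fn : Prop := ∀ (correct_set : List Int) (guess_set : List Int), Dom_tp_fp_fn correct_set guess_set → Spec_tp_fp_fn correct_set guess_set (tp_fp_fn correct_set guess_set)

-- ===== LEMMAS AND PROOFS =====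

-- (proof helper) summing f over the true-entries only
theorem sum_ite_filter (xs : List Int) (p : Int → Bool) (f : Int → Int) :
    (xs.map (fun k => if p k then f k else 0)).sum = ((xs.filter p).map f).sum := by
  induction xs with
  | nil => simp
  | cons x t ih => by_cases h : p x <;> simp [h, ih]

-- B's sum over the counter's items with a key guard is a countP of the list
theorem counter_items_sum (l : List Int) (q : Int → Bool) :
    (PySem.Dict.counter l).items.foldl
      (fun (s : Int) p => if q p.1 then s else s + p.2) 0
    = (l.countP (fun e => !q e) : Int) := by
  rw [PySem.Dict.items_counter, List.foldl_map]
  have hf : (fun (s : Int) k => if q k then s else s + ((l.count k : Nat) : Int))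
      = (fun (s : Int) k => s + (if !q k then ((l.count k : Nat) : Int) else 0)) := by
    funext s k; by_cases h : q k <;> simp [h]
  rw [hf, PySem.List.foldl_add]
  have hperm : (PySem.Set.ofList l : List Int).Perm l.dedup :=
    (List.perm_ext_iff_of_nodup (PySem.Set.nodup_ofList l) l.nodup_dedup).mpr
      (fun a => by simp [PySem.Set.mem_ofList, List.mem_dedup])
  rw [List.Perm.sum_eq (hperm.map _), sum_ite_filter,
      ← List.sum_map_count_dedup_filter_eq_countP (fun e => !q e) l,
      Nat.cast_list_sum, List.map_map]
  simp [Function.comp_def]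

-- A's paired tp/fp fold computes the two countP's
theorem tpfp_fold_eq (c g : List Int) :
    g.foldl (fun (p : Int × Int) elem =>
      if elem ∈ c then (p.1 + 1, p.2) else (p.1, p.2 + 1)) (0, 0)
    = ((g.countP (fun e => decide (e ∈ c)) : Int),
       (g.countP (fun e => !decide (e ∈ c)) : Int)) := by
  have hf : (fun (p : Int × Int) elem =>
        if elem ∈ c then (p.1 + 1, p.2) else (p.1, p.2 + 1))
      = (fun (p : Int × Int) elem =>
        ((fun (a : Int) e => if decide (e ∈ c) then a + 1 else a) p.1 elem,
         (fun (b : Int) e => if !decide (e ∈ c) then b + 1 else b) p.2 elem)) := by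
    funext p elem; by_cases h : elem ∈ c <;> simp [h]
  rw [hf, PySem.List.foldl_prod_mk (fun (a : Int) e => if decide (e ∈ c) then a + 1 else a)
        (fun (b : Int) e => if !decide (e ∈ c) then b + 1 else b) g 0 0,
      PySem.List.foldl_count_if, PySem.List.foldl_count_if]
  simp

-- A's fn fold is a countP
theorem fn_fold_eq (c g : List Int) :
    c.foldl (fun (f : Int) elem => if elem ∈ g then f else f + 1) 0
    = (c.countP (fun e => !decide (e ∈ g)) : Int) := by
  have hf : (fun (f : Int) elem => if elem ∈ g then f else f + 1)
      = (fun (f : Int) elem => if !decide (elem ∈ g) then f + 1 else f) := by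
    funext f elem; by_cases h : elem ∈ g <;> simp [h]
  rw [hf, PySem.List.foldl_count_if]
  simp

-- ===== VERDICT (by name: the statement is the Claim_ definition above) =====
theorem tp_fp_fn_spec : Claim_equal_tp_fp_fn := by
  intro c g _
  unfold Spec_tp_fp_fn tp_fp_fn tp_fp_fn_alt
  rw [PySem.Dict.foldl_insert_getD_add_one_eq_counter,
      PySem.Dict.foldl_insert_getD_add_one_eq_counter]
  simp only [PySem.Dict.contains_counter]
  rw [tpfp_fold_eq, fn_fold_eq, counter_items_sum, counter_items_sum]
  have h1 : g.countP (fun e => !(c.contains e)) = g.countP (fun e => !decide (e ∈ c)) := by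
    apply List.countP_congr; intro a _; simp
  have h2 : c.countP (fun e => !(g.contains e)) = c.countP (fun e => !decide (e ∈ g)) := by
    apply List.countP_congr; intro a _; simp
  have h3 : g.countP (fun e => decide (e ∈ c)) + g.countP (fun e => !decide (e ∈ c)) = g.length := by
    rw [List.length_eq_countP_add_countP (fun e => decide (e ∈ c)) (l := g)]
    congr 1
    apply List.countP_congr; intro a _; simp
  rw [h1, h2]
  refine Prod.ext ?_ (Prod.ext ?_ rfl) <;> simp <;> omega
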